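-- pv_equiv track=rewrite | github.com/halfminthink-bit/articlebot3 | 使用済み/publish_md_to_gdoc_afterH2_images.py | extract_title_and_h2
-- ===== SOURCE A (Python) =====
-- from typing import List, Dict, Tuple, Optional
--
-- def extract_title_and_h2(md_text: str) -> Tuple[str, List[str]]:
--     title = ""
--     h2s: List[str] = []
--     for line in md_text.splitlines():
--         if not title and line.startswith("# "):
--             title = line[2:].strip()
--         if line.startswith("## "):
--             h2s.append(line[3:].strip())
--     if not title:
--         title = "Untitled"
--     return title, h2s
-- ===== SOURCE B (Python) =====
-- def extract_title_and_h2(md_text: str):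
--     title = "Untitled"
--     h2s = []
--     for line in reversed(md_text.splitlines()):
--         if line.startswith("## "):
--             h2s.append(line[3:].strip())
--         if line.startswith("# "):
--             s = line[2:].strip()
--             if s:
--                 title = s
--     h2s.reverse()
--     return title, h2s
-- ===== Notes on version B (the rewrite author's own statement) =====
-- stated objective: alternative
-- what changed: B walks the lines in REVERSE, appending H2 texts back-to-front (one final reverse restores order) and overwriting the title on every qualifying H1 line so the first one in the document wins, instead of A's forward loop that freezes the title once set and appends H2s in order.
import Mathlib
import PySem

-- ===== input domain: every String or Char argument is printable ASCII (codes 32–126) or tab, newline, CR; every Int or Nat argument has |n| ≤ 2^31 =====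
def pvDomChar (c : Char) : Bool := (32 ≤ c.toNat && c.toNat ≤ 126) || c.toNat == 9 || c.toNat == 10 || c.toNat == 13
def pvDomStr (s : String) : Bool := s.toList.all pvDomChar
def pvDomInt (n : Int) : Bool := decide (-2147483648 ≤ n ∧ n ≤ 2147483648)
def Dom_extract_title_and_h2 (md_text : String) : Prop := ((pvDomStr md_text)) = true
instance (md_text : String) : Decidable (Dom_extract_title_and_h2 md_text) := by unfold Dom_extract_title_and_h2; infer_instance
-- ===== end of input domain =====

-- B traverses the lines in reverse (H2s appended back-to-front then reversed once; the title
-- overwritten so the first qualifying H1 wins), instead of A's forward state-freezing loop;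
-- objective: alternative (order-insensitivity proved).

-- ===== PORT A =====
-- one forward fold over the lines carrying (title, h2s), exactly A's loop body
def extract_title_and_h2_step (st : String × List String) (line : String) : String × List String :=
  let t := if st.1 == "" && PySem.Str.startswith line "# "
           then PySem.Str.strip (PySem.Str.slice line (some 2) none) else st.1
  let hs := if PySem.Str.startswith line "## "
            then st.2 ++ [PySem.Str.strip (PySem.Str.slice line (some 3) none)] else st.2
  (t, hs)

def extract_title_and_h2 (md_text : String) : String × List String :=
  let r := (PySem.Str.splitlines md_text).foldl extract_title_and_h2_step ("", [])
  (if r.1 == "" then "Untitled" else r.1, r.2)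

-- ===== PORT B =====
-- Source B's loop body over the REVERSED lines: append the H2 text, overwrite the title if non-empty
def extract_title_and_h2_alt_step (st : String × List String) (line : String) : String × List String :=
  let hs := if PySem.Str.startswith line "## "
            then st.2 ++ [PySem.Str.strip (PySem.Str.slice line (some 3) none)] else st.2
  let t := if PySem.Str.startswith line "# "
           then (let s := PySem.Str.strip (PySem.Str.slice line (some 2) none)
                 if s == "" then st.1 else s)
           else st.1
  (t, hs)

def extract_title_and_h2_alt (md_text : String) : String × List String :=
  let r := ((PySem.Str.splitlines md_text).reverse).foldl extract_title_and_h2_alt_step ("Untitled", [])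
  (r.1, r.2.reverse)

-- ===== PRECONDITION & SPEC =====
def Spec_extract_title_and_h2 (md_text : String) (out : String × List String) : Prop := out = extract_title_and_h2_alt md_text
instance (md_text : String) (out : String × List String) : Decidable (Spec_extract_title_and_h2 md_text out) := by unfold Spec_extract_title_and_h2; infer_instance

-- ===== CLAIM (what is proved, stated in full; the proofs are below) =====
def Claim_equal_extract_title_and_h2 : Prop := ∀ (md_text : String), Dom_extract_title_and_h2 md_text → Spec_extract_title_and_h2 md_text (extract_title_and_h2 md_text)

-- ===== LEMMAS AND PROOFS =====

-- the common characterisation both ports are reduced to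
def pvH2pred (line : String) : Bool := PySem.Str.startswith line "## "
def pvH2map (line : String) : String := PySem.Str.strip (PySem.Str.slice line (some 3) none)
def pvTitlePred (line : String) : Bool :=
  PySem.Str.startswith line "# " && !(PySem.Str.strip (PySem.Str.slice line (some 2) none) == "")

-- A side -------------------------------------------------------------------
theorem pvA_fold_snd (lines : List String) (t : String) (hs : List String) :
    (lines.foldl extract_title_and_h2_step (t, hs)).2 =
      hs ++ (lines.filter pvH2pred).map pvH2map := by
  induction lines generalizing t hs with
  | nil => simp
  | cons l ls ih =>
    simp only [List.foldl_cons, List.filter_cons]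
    by_cases h2 : pvH2pred l = true <;>
      simp [extract_title_and_h2_step, pvH2pred, pvH2map, h2, ih] at * <;>
      simp [extract_title_and_h2_step, pvH2pred, pvH2map, h2, ih]

theorem pvA_fold_fst_ne (lines : List String) (t : String) (hs : List String) (ht : ¬ (t = "")) :
    (lines.foldl extract_title_and_h2_step (t, hs)).1 = t := by
  induction lines generalizing hs with
  | nil => rfl
  | cons l ls ih =>
    simp only [List.foldl_cons]
    have : extract_title_and_h2_step (t, hs) l =
        (t, (extract_title_and_h2_step (t, hs) l).2) := by
      simp [extract_title_and_h2_step, ht]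
    rw [this]; exact ih _

theorem pvA_fold_fst_empty (lines : List String) (hs : List String) :
    (lines.foldl extract_title_and_h2_step ("", hs)).1 =
      (match lines.find? pvTitlePred with
       | some line => PySem.Str.strip (PySem.Str.slice line (some 2) none)
       | none => "") := by
  induction lines generalizing hs with
  | nil => rfl
  | cons l ls ih =>
    simp only [List.foldl_cons, List.find?_cons]
    by_cases hp : pvTitlePred l = true
    · have hp2 := hp
      simp [pvTitlePred, PySem.Str.startswith] at hp2
      have hst : extract_title_and_h2_step ("", hs) l =
          (PySem.Str.strip (PySem.Str.slice l (some 2) none),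
           (extract_title_and_h2_step ("", hs) l).2) := by
        simp [extract_title_and_h2_step, PySem.Str.startswith, hp2.1]
      rw [hst, pvA_fold_fst_ne _ _ _ hp2.2, hp]
    · have hp' : pvTitlePred l = false := by simpa using hp
      have hst : extract_title_and_h2_step ("", hs) l =
          ("", (extract_title_and_h2_step ("", hs) l).2) := by
        by_cases h1 : PySem.Chars.startswith l.toList ['#', ' '] = true
        · have h2 : PySem.Str.strip (PySem.Str.slice l (some 2) none) = "" := by
            simp [pvTitlePred, PySem.Str.startswith, h1] at hp'; exact hp'
          simp [extract_title_and_h2_step, PySem.Str.startswith, h1, h2]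
        · simp [extract_title_and_h2_step, PySem.Str.startswith, h1]
      rw [hst, ih, hp']

-- B side -------------------------------------------------------------------
-- the reversed foldl is a foldr; characterise it by induction on the line list
theorem pvB_foldr_snd (lines : List String) (t : String) :
    (lines.foldr (fun x acc => extract_title_and_h2_alt_step acc x) (t, [])).2 =
      ((lines.filter pvH2pred).map pvH2map).reverse := by
  induction lines with
  | nil => simp
  | cons l ls ih =>
    simp only [List.foldr_cons, List.filter_cons]
    rcases hacc : ls.foldr (fun x acc => extract_title_and_h2_alt_step acc x) (t, []) with ⟨t2, hs2⟩
    rw [hacc] at ih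
    by_cases h2 : pvH2pred l = true
    · have h2' : PySem.Chars.startswith l.toList ['#', '#', ' '] = true := by
        simpa [pvH2pred, PySem.Str.startswith] using h2
      simp [extract_title_and_h2_alt_step, h2', h2, pvH2map]
      exact ih
    · have h2' : PySem.Chars.startswith l.toList ['#', '#', ' '] = false := by
        simpa [pvH2pred, PySem.Str.startswith] using h2
      simp [extract_title_and_h2_alt_step, h2', h2, ih]

theorem pvB_foldr_fst (lines : List String) (t : String) :
    (lines.foldr (fun x acc => extract_title_and_h2_alt_step acc x) (t, [])).1 =
      (match lines.find? pvTitlePred with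
       | some line => PySem.Str.strip (PySem.Str.slice line (some 2) none)
       | none => t) := by
  induction lines with
  | nil => rfl
  | cons l ls ih =>
    simp only [List.foldr_cons, List.find?_cons]
    rcases hacc : ls.foldr (fun x acc => extract_title_and_h2_alt_step acc x) (t, []) with ⟨t2, hs2⟩
    rw [hacc] at ih
    by_cases hp : pvTitlePred l = true
    · have hp2 := hp
      simp [pvTitlePred, PySem.Str.startswith] at hp2
      simp [extract_title_and_h2_alt_step, hp2.1, hp2.2, hp]
    · have hp' : pvTitlePred l = false := by simpa using hp
      rw [hp']
      by_cases h1 : PySem.Chars.startswith l.toList ['#', ' '] = true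
      · have h2 : PySem.Str.strip (PySem.Str.slice l (some 2) none) = "" := by
          simp [pvTitlePred, PySem.Str.startswith, h1] at hp'; exact hp'
        simp [extract_title_and_h2_alt_step, h1, h2, ih]
      · simp [extract_title_and_h2_alt_step, h1, ih]

-- ===== VERDICT (by name: the statement is the Claim_ definition above) =====
theorem extract_title_and_h2_spec : Claim_equal_extract_title_and_h2 := by
  intro md_text _
  unfold Spec_extract_title_and_h2 extract_title_and_h2 extract_title_and_h2_alt
  rw [List.foldl_reverse]
  simp only [pvA_fold_snd, pvA_fold_fst_empty, pvB_foldr_snd, pvB_foldr_fst,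
    List.nil_append, List.append_nil, List.reverse_reverse]
  cases h : (PySem.Str.splitlines md_text).find? pvTitlePred with
  | none => simp
  | some line =>
    have := List.find?_some h
    have hne : ¬ (PySem.Str.strip (PySem.Str.slice line (some 2) none) = "") := by
      simp [pvTitlePred] at this; exact this.2
    simp [hne]
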